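-- pv_equiv track=rewrite | github.com/Rachid-Mek/data-mining | Dataset_1_logic.py | find_min_max_mode
-- ===== SOURCE A (Python) =====
-- def find_min_max_mode(dataset):
--     """Find the minimum, maximum and mode of a dataset"""
--     # Finding minimum value
--     min_value = dataset[0]
--     for value in dataset[1:]:
--         if value < min_value:
--             min_value = value
--
--     # Finding maximum value
--     max_value = dataset[0]
--     for value in dataset[1:]:
--         if value > max_value:
--             max_value = value
--
--     # Finding mode
--     frequency = {}
--     for value in dataset:
--         if value in frequency:
--             frequency[value] += 1
--         else:
--             frequency[value] = 1
--
--     mode = None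
--     max_frequency = 0
--     for value, freq in frequency.items():
--         if freq > max_frequency:
--             max_frequency = freq
--             mode = value
--
--     return min_value, max_value, mode
-- ===== SOURCE B (Python) =====
-- def _combine(xs):
--     """Divide and conquer: (min, max, frequency dict) of a nonempty chunk."""
--     if len(xs) == 1:
--         return xs[0], xs[0], {xs[0]: 1}
--     mid = len(xs) // 2
--     lo1, hi1, f1 = _combine(xs[:mid])
--     lo2, hi2, f2 = _combine(xs[mid:])
--     for value, count in f2.items():
--         f1[value] = f1.get(value, 0) + count
--     return min(lo1, lo2), max(hi1, hi2), f1
--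
--
-- def find_min_max_mode(dataset):
--     """Find the minimum, maximum and mode of a dataset (divide and conquer)."""
--     lo, hi, freq = _combine(dataset)
--     mode = max(freq.items(), key=lambda kv: kv[1])[0]
--     return lo, hi, mode
-- ===== Notes on version B (the rewrite author's own statement) =====
-- stated objective: alternative
-- what changed: Replaces A's three iterative scans and element-by-element dict counting with a divide-and-conquer recursion that splits the list in half and merges (min, max, frequency) triples, then picks the mode with max over the merged dict's items (same first-occurrence tie-break); Pre_ excludes only the empty list, on which A raises IndexError (B raises RecursionError).
import Mathlib
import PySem

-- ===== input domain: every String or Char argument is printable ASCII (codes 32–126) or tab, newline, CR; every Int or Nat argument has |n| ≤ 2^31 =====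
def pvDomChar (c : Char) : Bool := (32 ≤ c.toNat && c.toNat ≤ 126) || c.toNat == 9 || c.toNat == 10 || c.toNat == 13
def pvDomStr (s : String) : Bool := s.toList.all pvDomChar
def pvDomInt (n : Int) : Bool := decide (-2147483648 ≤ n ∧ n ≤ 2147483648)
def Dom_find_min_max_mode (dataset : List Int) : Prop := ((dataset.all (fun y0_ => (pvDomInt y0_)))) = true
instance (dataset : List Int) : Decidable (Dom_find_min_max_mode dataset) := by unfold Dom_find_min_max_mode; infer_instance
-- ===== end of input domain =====

-- B replaces A's three iterative scans and element-by-element dict counting with a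
-- divide-and-conquer recursion merging (min, max, frequency) triples of the two halves,
-- then picks the mode with max over the merged dict's items; objective: alternative.

-- ===== PORT A =====
def find_min_max_mode (dataset : List Int) : Int × Int × Int :=
  match dataset with
  | [] => (0, 0, 0)  -- dataset[0] raises IndexError on the first-element access; excluded by Pre_
  | d0 :: rest =>
    -- min scan over dataset[1:]
    let min_value := rest.foldl (fun m v => if v < m then v else m) d0
    -- max scan over dataset[1:]
    let max_value := rest.foldl (fun m v => if v > m then v else m) d0
    -- frequency dict
    let frequency := dataset.foldl
      (fun (d : PySem.Dict Int Int) v =>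
        if d.contains v then d.modify v 0 (· + 1) else d.insert v 1)
      PySem.Dict.empty
    -- mode scan over frequency.items()
    let st := frequency.items.foldl
      (fun (st : Option Int × Int) kv =>
        if kv.2 > st.2 then (some kv.1, kv.2) else st)
      (none, 0)
    -- st.1 = none only for an empty dict, impossible under Pre_ (Python would return None)
    (min_value, max_value, st.1.getD 0)

-- ===== PORT B =====
-- _combine(xs): divide and conquer over a chunk; xs[:mid] / xs[mid:] with 0 ≤ mid ≤ len
-- are exactly take/drop.  min(a,b) / max(a,b) on ints are exactly Int.min / Int.max.
def pvCombine (xs : List Int) : Int × Int × PySem.Dict Int Int :=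
  if h1 : xs.length = 1 then
    -- base case: (xs[0], xs[0], {xs[0]: 1})
    (xs.headI, xs.headI, PySem.Dict.empty.insert xs.headI 1)
  else if h0 : xs.length ≤ 1 then
    -- xs = []: Python's _combine never returns here (it recurses forever); totality guard
    (0, 0, PySem.Dict.empty)
  else
    let mid := xs.length / 2
    let r1 := pvCombine (xs.take mid)
    let r2 := pvCombine (xs.drop mid)
    -- for value, count in f2.items(): f1[value] = f1.get(value, 0) + count
    let f := r2.2.2.items.foldl (fun d kv => d.modify kv.1 0 (· + kv.2)) r1.2.2
    (min r1.1 r2.1, max r1.2.1 r2.2.1, f)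
termination_by xs.length
decreasing_by
  · simp only [List.length_take]; omega
  · simp only [List.length_drop]; omega

def find_min_max_mode_alt (dataset : List Int) : Int × Int × Int :=
  let r := pvCombine dataset
  -- mode = max(freq.items(), key=kv[1])[0]; max? = none only for an empty dict (excluded by Pre_)
  (r.1, r.2.1, ((PySem.List.max? r.2.2.items (fun kv => kv.2)).map Prod.fst).getD 0)

-- ===== PRECONDITION & SPEC =====
-- Pre_ excludes only the empty list, where A raises IndexError (B raises RecursionError).
def Pre_find_min_max_mode (dataset : List Int) : Prop := dataset ≠ []
instance (dataset : List Int) : Decidable (Pre_find_min_max_mode dataset) := by unfold Pre_find_min_max_mode; infer_instance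
def pvWitness_find_min_max_mode : List Int := [1, 2, 2, -3]

def Spec_find_min_max_mode (dataset : List Int) (out : Int × Int × Int) : Prop := out = find_min_max_mode_alt dataset
instance (dataset : List Int) (out : Int × Int × Int) : Decidable (Spec_find_min_max_mode dataset out) := by unfold Spec_find_min_max_mode; infer_instance

-- ===== CLAIM (what is proved, stated in full; the proofs are below) =====
def Claim_equal_find_min_max_mode : Prop := ∀ (dataset : List Int), Dom_find_min_max_mode dataset → Pre_find_min_max_mode dataset → Spec_find_min_max_mode dataset (find_min_max_mode dataset)

-- ===== LEMMAS AND PROOFS =====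

-- A's manual min/max updates are Int min/max
lemma min_step_eq : (fun (m v : Int) => if v < m then v else m) = fun m v => min m v := by
  funext m v; rw [min_def]; split_ifs <;> omega

lemma max_step_eq : (fun (m v : Int) => if v > m then v else m) = fun m v => max m v := by
  funext m v; rw [max_def]; split_ifs <;> omega

-- seed-splitting for foldl min / max
lemma foldl_min_shift (u : List Int) : ∀ c b : Int, u.foldl min (min c b) = min c (u.foldl min b) := by
  induction u with
  | nil => intro c b; rfl
  | cons x t ih =>
    intro c b
    simp only [List.foldl, min_assoc]
    exact ih c (min b x)

lemma foldl_max_shift (u : List Int) : ∀ c b : Int, u.foldl max (max c b) = max c (u.foldl max b) := by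
  induction u with
  | nil => intro c b; rfl
  | cons x t ih =>
    intro c b
    simp only [List.foldl, max_assoc]
    exact ih c (max b x)

-- min/max of an appended nonempty chunk
def pvMin : List Int → Int
  | [] => 0
  | a :: t => t.foldl min a

def pvMax : List Int → Int
  | [] => 0
  | a :: t => t.foldl max a

lemma pvMin_append (s u : List Int) (hs : s ≠ []) (hu : u ≠ []) :
    pvMin (s ++ u) = min (pvMin s) (pvMin u) := by
  obtain ⟨a, s', rfl⟩ := List.exists_cons_of_ne_nil hs
  obtain ⟨b, u', rfl⟩ := List.exists_cons_of_ne_nil hu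
  simp only [pvMin, List.cons_append, List.foldl_append, List.foldl]
  exact foldl_min_shift u' (List.foldl min a s') b

lemma pvMax_append (s u : List Int) (hs : s ≠ []) (hu : u ≠ []) :
    pvMax (s ++ u) = max (pvMax s) (pvMax u) := by
  obtain ⟨a, s', rfl⟩ := List.exists_cons_of_ne_nil hs
  obtain ⟨b, u', rfl⟩ := List.exists_cons_of_ne_nil hu
  simp only [pvMax, List.cons_append, List.foldl_append, List.foldl]
  exact foldl_max_shift u' (List.foldl max a s') b

-- lookup after a bulk-add fold over a pairs list
lemma getD_foldl_modify_pairs (ps : List (Int × Int)) :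
    ∀ (d : PySem.Dict Int Int) (k : Int),
    (ps.foldl (fun d kv => d.modify kv.1 0 (· + kv.2)) d).getD k 0
      = d.getD k 0 + (ps.map (fun kv => if kv.1 = k then kv.2 else 0)).sum := by
  induction ps with
  | nil => intro d k; simp
  | cons kv t ih =>
    intro d k
    simp only [List.foldl, List.map, List.sum_cons]
    rw [ih, PySem.Dict.getD_modify]
    by_cases h : k = kv.1
    · subst h
      rw [if_pos rfl, if_pos rfl]
      ring
    · rw [if_neg h, if_neg (fun e => h e.symm)]
      ring

-- sum of a one-hot map over a Nodup list
lemma sum_if_nodup (s : List Int) (hs : s.Nodup) (c : Int → Int) (k : Int)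
    (hk0 : k ∉ s → c k = 0) :
    (s.map (fun j => if j = k then c j else 0)).sum = c k := by
  induction s with
  | nil => simpa using (hk0 (by simp)).symm
  | cons a t ih =>
    rcases List.nodup_cons.mp hs with ⟨ha, ht⟩
    by_cases h : a = k
    · subst h
      have : ∀ x ∈ t.map (fun j => if j = a then c j else 0), x = 0 := by
        intro x hx
        obtain ⟨j, hj, rfl⟩ := List.mem_map.mp hx
        have : j ≠ a := fun e => ha (e ▸ hj)
        simp [this]
      simp [List.sum_eq_zero this]
    · have : k ∉ t → c k = 0 := fun hkt => hk0 (by simp [Ne.symm h, hkt])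
      simp only [List.map, List.sum_cons, if_neg h]
      rw [ih ht this]; ring

-- updating with a deduplicated list is updating with the list
lemma update_ofList (l : List Int) : ∀ s : List Int,
    PySem.Set.update s (PySem.Set.ofList l) = PySem.Set.update s l := by
  induction l using List.reverseRecOn with
  | nil => intro s; rfl
  | append_singleton t v ih =>
    intro s
    rw [PySem.Set.ofList_append_singleton]
    by_cases h : v ∈ PySem.Set.ofList t
    · have hvt : v ∈ t := (PySem.Set.mem_ofList t v).mp h
      rw [PySem.Set.add_of_mem h, ih,
          PySem.Set.update_append, PySem.Set.update_cons, PySem.Set.update_nil,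
          PySem.Set.add_of_mem (by rw [PySem.Set.mem_update]; exact Or.inr hvt)]
    · rw [PySem.Set.add_of_not_mem h,
          PySem.Set.update_append, PySem.Set.update_cons, PySem.Set.update_nil,
          PySem.Set.update_append, PySem.Set.update_cons, PySem.Set.update_nil, ih]

-- replaying Counter(ys) as bulk additions = counting ys one by one
lemma merge_counter (ys : List Int) (d : PySem.Dict Int Int) (hd : d.keys.Nodup) :
    (PySem.Dict.counter ys).items.foldl (fun d kv => d.modify kv.1 0 (· + kv.2)) d
      = ys.foldl (fun d v => d.modify v 0 (· + 1)) d := by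
  have hL : ((PySem.Dict.counter ys).items.foldl
      (fun d kv => d.modify kv.1 0 (· + kv.2)) d).keys.Nodup :=
    PySem.Dict.nodup_keys_foldl_modify_key _ Prod.fst 0 (fun _ kv => (· + kv.2)) d hd
  have hR : (ys.foldl (fun d v => d.modify v 0 (· + 1)) d).keys.Nodup :=
    PySem.Dict.nodup_keys_foldl_modify_key _ id 0 (fun _ _ => (· + 1)) d hd
  apply PySem.Dict.ext
  rw [PySem.Dict.items_eq_map_keys _ hL 0, PySem.Dict.items_eq_map_keys _ hR 0]
  have hkeys : ((PySem.Dict.counter ys).items.foldl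
        (fun d kv => d.modify kv.1 0 (· + kv.2)) d).keys
      = (ys.foldl (fun d v => d.modify v 0 (· + 1)) d).keys := by
    rw [PySem.Dict.keys_foldl_modify_key _ Prod.fst 0 (fun _ kv => (· + kv.2)) d,
        PySem.Dict.keys_foldl_modify]
    have : (PySem.Dict.counter ys).items.map Prod.fst = PySem.Set.ofList ys := by
      rw [show (PySem.Dict.counter ys).items.map Prod.fst = (PySem.Dict.counter ys).keys from rfl,
          PySem.Dict.keys_counter]
    rw [this, update_ofList]
  rw [hkeys]
  apply List.map_congr_left
  intro k _
  have hgL : ((PySem.Dict.counter ys).items.foldl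
      (fun d kv => d.modify kv.1 0 (· + kv.2)) d).getD k 0 = d.getD k 0 + (ys.count k : Int) := by
    rw [getD_foldl_modify_pairs, PySem.Dict.items_counter, List.map_map]
    have : ((PySem.Set.ofList ys).map
        ((fun kv => if kv.1 = k then kv.2 else 0) ∘ fun j => (j, (ys.count j : Int)))).sum
        = (ys.count k : Int) := by
      have := sum_if_nodup (PySem.Set.ofList ys) (PySem.Set.nodup_ofList ys)
        (fun j => (ys.count j : Int)) k
        (fun hk => by
          have : k ∉ ys := fun hky => hk ((PySem.Set.mem_ofList ys k).mpr hky)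
          simp [List.count_eq_zero_of_not_mem this])
      simpa [Function.comp] using this
    rw [this]
  rw [hgL, PySem.Dict.getD_foldl_modify_add_one]

-- divide and conquer computes (min, max, Counter)
lemma combine_spec (n : Nat) : ∀ xs : List Int, xs.length = n → xs ≠ [] →
    pvCombine xs = (pvMin xs, pvMax xs, PySem.Dict.counter xs) := by
  induction n using Nat.strong_induction_on with
  | _ n ih =>
    intro xs hlen hne
    rw [pvCombine]
    by_cases h1 : xs.length = 1
    · obtain ⟨a, rfl⟩ := List.length_eq_one_iff.mp h1
      simp only [dif_pos h1, List.headI, pvMin, pvMax, List.foldl]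
      refine congrArg _ (congrArg _ ?_)
      rw [PySem.Dict.counter_eq_foldl]
      simp only [List.foldl]
      rw [PySem.Dict.modify, PySem.Dict.getD_empty]
      norm_num
    · have hnz : xs.length ≠ 0 := fun h => hne (List.length_eq_zero_iff.mp h)
      have h0 : ¬ xs.length ≤ 1 := by omega
      simp only [dif_neg h1, dif_neg h0]
      have hmid1 : 1 ≤ xs.length / 2 := by omega
      have hmidlt : xs.length / 2 < xs.length := by omega
      have hs : xs.take (xs.length / 2) ≠ [] := by
        intro h; have := congrArg List.length h
        simp only [List.length_take, List.length_nil] at this; omega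
      have hu : xs.drop (xs.length / 2) ≠ [] := by
        intro h; have := congrArg List.length h
        simp only [List.length_drop, List.length_nil] at this; omega
      have hlt1 : (xs.take (xs.length / 2)).length < n := by
        rw [List.length_take]; omega
      have hlt2 : (xs.drop (xs.length / 2)).length < n := by
        rw [List.length_drop]; omega
      rw [ih _ hlt1 _ rfl hs, ih _ hlt2 _ rfl hu]
      have hsplit : xs.take (xs.length / 2) ++ xs.drop (xs.length / 2) = xs :=
        List.take_append_drop (xs.length / 2) xs
      refine Prod.ext ?_ (Prod.ext ?_ ?_)
      · show min (pvMin (xs.take (xs.length / 2))) (pvMin (xs.drop (xs.length / 2))) = pvMin xs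
        conv_rhs => rw [← hsplit]
        exact (pvMin_append _ _ hs hu).symm
      · show max (pvMax (xs.take (xs.length / 2))) (pvMax (xs.drop (xs.length / 2))) = pvMax xs
        conv_rhs => rw [← hsplit]
        exact (pvMax_append _ _ hs hu).symm
      · show (PySem.Dict.counter (xs.drop (xs.length / 2))).items.foldl
            (fun d kv => d.modify kv.1 0 (· + kv.2)) (PySem.Dict.counter (xs.take (xs.length / 2)))
            = PySem.Dict.counter xs
        rw [merge_counter _ _ (PySem.Dict.nodup_keys_counter _)]
        conv_rhs => rw [← hsplit]
        rw [PySem.Dict.counter_eq_foldl, PySem.Dict.counter_eq_foldl, List.foldl_append]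

-- A's branching frequency update is the counter update
lemma freq_step_eq (d : PySem.Dict Int Int) (v : Int) :
    (if d.contains v then d.modify v 0 (· + 1) else d.insert v 1)
      = d.modify v 0 (· + 1) := by
  by_cases h : d.contains v = true
  · simp [h]
  · have hf : d.contains v = false := by simpa using h
    rw [if_neg h, PySem.Dict.modify, PySem.Dict.getD_of_not_contains d 0 hf]
    norm_num

lemma freq_eq_counter (l : List Int) :
    l.foldl
      (fun (d : PySem.Dict Int Int) v =>
        if d.contains v then d.modify v 0 (· + 1) else d.insert v 1)
      PySem.Dict.empty = PySem.Dict.counter l := by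
  rw [PySem.Dict.counter_eq_foldl]
  congr 1
  funext d v
  exact freq_step_eq d v

-- one step of max?'s first-extremal scan folded into the head
lemma max?_cons_cons (p x : Int × Int) (t : List (Int × Int)) :
    PySem.List.max? (p :: x :: t) (fun kv => kv.2)
      = PySem.List.max? ((if p.2 < x.2 then x else p) :: t) (fun kv => kv.2) := by
  by_cases h : p.2 < x.2 <;> simp [PySem.List.max?, List.foldl, h]

-- A's strict-> mode scan seeded with p computes max? of p :: l
lemma mode_fold_eq (l : List (Int × Int)) (p : Int × Int) :
    l.foldl
      (fun (st : Option Int × Int) kv =>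
        if kv.2 > st.2 then (some kv.1, kv.2) else st)
      (some p.1, p.2)
    = (match PySem.List.max? (p :: l) (fun kv => kv.2) with
       | some kv => ((some kv.1 : Option Int), kv.2)
       | none => (none, 0)) := by
  induction l generalizing p with
  | nil => simp [PySem.List.max?, List.foldl]
  | cons x t ih =>
    rw [max?_cons_cons]
    by_cases h : p.2 < x.2
    · simpa [List.foldl, gt_iff_lt, h] using ih x
    · simpa [List.foldl, gt_iff_lt, h] using ih p

-- the full mode correspondence on an items list with positive counts
lemma mode_eq (l : List (Int × Int)) (hpos : ∀ kv ∈ l, 0 < kv.2) :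
    (l.foldl
      (fun (st : Option Int × Int) kv =>
        if kv.2 > st.2 then (some kv.1, kv.2) else st)
      (none, 0)).1.getD 0
    = ((PySem.List.max? l (fun kv => kv.2)).map Prod.fst).getD 0 := by
  cases l with
  | nil => rfl
  | cons kv t =>
    have hk : (0 : Int) < kv.2 := hpos kv (by simp)
    have h1 : List.foldl
        (fun (st : Option Int × Int) kv =>
          if kv.2 > st.2 then (some kv.1, kv.2) else st)
        (none, 0) (kv :: t)
        = List.foldl
            (fun (st : Option Int × Int) kv =>
              if kv.2 > st.2 then (some kv.1, kv.2) else st)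
            (some kv.1, kv.2) t := by
      simp [List.foldl, gt_iff_lt, hk]
    rw [h1, mode_fold_eq t kv]
    cases hr : PySem.List.max? (kv :: t) (fun kv => kv.2) <;> simp

-- positive counts in the counter's items
lemma counter_items_pos (l : List Int) :
    ∀ kv ∈ (PySem.Dict.counter l).items, (0 : Int) < kv.2 := by
  intro kv hkv
  rw [PySem.Dict.items_counter] at hkv
  obtain ⟨k, hk, rfl⟩ := List.mem_map.mp hkv
  have hmem : k ∈ l := (PySem.Set.mem_ofList l k).mp hk
  have hc := List.count_pos_iff.mpr hmem
  show (0 : Int) < ((List.count k l : Nat) : Int)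
  exact_mod_cast hc

-- ===== VERDICT (by name: the statement is the Claim_ definition above) =====
theorem find_min_max_mode_spec : Claim_equal_find_min_max_mode := by
  intro dataset _ hpre
  unfold Spec_find_min_max_mode
  cases dataset with
  | nil => exact absurd rfl hpre
  | cons d0 rest =>
    simp only [find_min_max_mode, find_min_max_mode_alt,
      combine_spec (d0 :: rest).length (d0 :: rest) rfl (List.cons_ne_nil d0 rest),
      freq_eq_counter]
    refine Prod.ext ?_ (Prod.ext ?_ ?_)
    · show rest.foldl (fun m v => if v < m then v else m) d0 = pvMin (d0 :: rest)
      rw [min_step_eq]; rfl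
    · show rest.foldl (fun m v => if v > m then v else m) d0 = pvMax (d0 :: rest)
      rw [max_step_eq]; rfl
    · exact mode_eq (PySem.Dict.counter (d0 :: rest)).items
        (counter_items_pos (d0 :: rest))
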